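-- pv_equiv track=rewrite | github.com/eshinhw/LeetCode | solutions/816-ambiguous-coordinates/n816.py | _helper
-- ===== SOURCE A (Python) =====
-- def _helper(substring: str):
--
--     sub_list = []
--
--     if substring[0] == '0' and substring[len(substring)-1] == '0':
--         sub_list.append('0')
--         return sub_list
--
--     # start with 0: 012
--     if substring[0] == '0':
--         new_string = substring[0] + '.' + substring[1:]
--         sub_list.append(new_string)
--         return sub_list
--
--     if substring[len(sub_list) - 1] == '0':
--         sub_list.append(substring)
--         return sub_list
--
--     sub_list.append(substring)
--
--     for i in range(1,len(substring)):
--         new_string = substring[0:i] + '.' + substring[i:]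
--         sub_list.append(new_string)
--
--     return sub_list
-- ===== SOURCE B (Python) =====
-- def _helper(substring: str):
--     # One uniform pass: the whole string plus every decimal split, each kept
--     # iff its integer part has no leading zero (unless it is exactly '0') and
--     # its fractional part has no trailing zero.
--     out = []
--     if substring == '0' or not substring.startswith('0'):
--         out.append(substring)
--     for i in range(1, len(substring)):
--         left, right = substring[:i], substring[i:]
--         if (left == '0' or not left.startswith('0')) and not right.endswith('0'):
--             out.append(left + '.' + right)
--     return out
-- ===== Notes on version B (the rewrite author's own statement) =====
-- stated objective: simpler
-- what changed: A decides the output shape by an early-return case chain on the first/last character; B makes one uniform pass over the whole string and every split position, keeping each candidate iff a local validity predicate holds (integer part '0' or no leading zero, fractional part no trailing zero), with no special cases.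
-- intended difference: On strings of length >= 2 whose first and last characters are both the zero digit (e.g. '00', '010') A returns a one-element list containing just the zero digit, silently dropping digits, which yields invalid coordinates in the surrounding LeetCode-816 solution; B returns [] because no decimal placement using all the digits is valid, which is the intended behaviour. — e.g. on _helper("00"): A returns ["0"], B returns []
import Mathlib
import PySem

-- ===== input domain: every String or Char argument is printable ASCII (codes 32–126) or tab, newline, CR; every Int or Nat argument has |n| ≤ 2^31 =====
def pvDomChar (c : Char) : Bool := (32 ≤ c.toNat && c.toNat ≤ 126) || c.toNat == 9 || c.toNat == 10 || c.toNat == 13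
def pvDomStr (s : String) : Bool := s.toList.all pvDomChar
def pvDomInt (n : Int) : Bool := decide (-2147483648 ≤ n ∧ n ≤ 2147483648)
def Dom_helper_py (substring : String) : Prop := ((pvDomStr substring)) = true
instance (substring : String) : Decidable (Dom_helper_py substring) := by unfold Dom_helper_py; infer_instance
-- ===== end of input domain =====

-- B replaces A's early-return case chain by one uniform validity-predicate pass over all
-- decimal-point placements (simpler); on len>=2 strings starting AND ending with '0' A's
-- ['0'] drops digits and B intentionally returns [] (see D_helper_py).


-- ===== PORT A =====
def helper_py (substring : String) : List String :=
  let l := substring.toList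
  match PySem.List.pyGet? l 0 with                                   -- substring[0] (IndexError on "")
  | none => []
  | some c0 =>
    match PySem.List.pyGet? l ((l.length : Int) - 1) with            -- substring[len(substring)-1]
    | none => []
    | some cl =>
      if c0 = '0' ∧ cl = '0' then ["0"]
      else if c0 = '0' then
        [String.ofList ([c0] ++ ['.'] ++ PySem.List.slice l (some 1) none)]   -- substring[0]+'.'+substring[1:]
      else
        match PySem.List.pyGet? l (0 - 1) with                       -- substring[len(sub_list)-1], sub_list = []
        | none => []
        | some cm =>
          if cm = '0' then [substring]
          else
            (PySem.List.pyRange 1 (l.length : Int) 1).foldl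
              (fun acc i =>
                acc ++ [String.ofList (PySem.List.slice l (some 0) (some i) ++ ['.'] ++
                                   PySem.List.slice l (some i) none)])
              [substring]

-- ===== PORT B =====
def helper_py_alt (substring : String) : List String :=
  let l := substring.toList
  let out : List String :=
    if l = ['0'] ∨ PySem.Chars.startswith l ['0'] = false then [substring] else []
  (PySem.List.pyRange 1 (l.length : Int) 1).foldl
    (fun acc i =>
      let left := PySem.List.slice l none (some i)
      let right := PySem.List.slice l (some i) none
      if (left = ['0'] ∨ PySem.Chars.startswith left ['0'] = false) ∧
         PySem.Chars.endswith right ['0'] = false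
      then acc ++ [String.ofList (left ++ ['.'] ++ right)] else acc)
    out

-- ===== PRECONDITION & SPEC =====
-- Pre_ excludes only the empty string, on which A raises IndexError (substring[0]).
def Pre_helper_py (substring : String) : Prop := substring ≠ ""
instance (substring : String) : Decidable (Pre_helper_py substring) := by unfold Pre_helper_py; infer_instance
def pvWitness_helper_py : String := "12"

-- On strings of length ≥ 2 whose first and last characters are both the zero digit
-- (e.g. "00", "010") A returns ["0"], silently dropping digits; B returns [] since no
-- placement using all the digits is valid, which is the intended behaviour.
def D_helper_py (substring : String) : Prop :=
  2 ≤ substring.toList.length ∧ substring.toList.head? = some '0' ∧ substring.toList.getLast? = some '0'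
instance (substring : String) : Decidable (D_helper_py substring) := by unfold D_helper_py; infer_instance

def Spec_helper_py (substring : String) (out : List String) : Prop :=
  ¬ D_helper_py substring → out = helper_py_alt substring
instance (substring : String) (out : List String) : Decidable (Spec_helper_py substring out) := by unfold Spec_helper_py; infer_instance

def pvDiffWitness_helper_py : String := "00"
def pvDiffWitnessOut_helper_py : (List String) × (List String) := (["0"], [])

-- ===== CLAIM (what is proved, stated in full; the proofs are below) =====
def Claim_unchanged_helper_py : Prop := ∀ (substring : String), Dom_helper_py substring → Pre_helper_py substring → Spec_helper_py substring (helper_py substring)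
def Claim_changed_helper_py : Prop := Dom_helper_py (pvDiffWitness_helper_py) ∧ Pre_helper_py (pvDiffWitness_helper_py) ∧ D_helper_py (pvDiffWitness_helper_py) ∧ helper_py (pvDiffWitness_helper_py) = pvDiffWitnessOut_helper_py.1 ∧ helper_py_alt (pvDiffWitness_helper_py) = pvDiffWitnessOut_helper_py.2 ∧ pvDiffWitnessOut_helper_py.1 ≠ pvDiffWitnessOut_helper_py.2
def Claim_exact_helper_py : Prop := ∀ (substring : String), Dom_helper_py substring → Pre_helper_py substring → D_helper_py substring → helper_py substring ≠ helper_py_alt substring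


-- ===== LEMMAS AND PROOFS =====

lemma pvGetZero {α : Type} (xs : List α) : PySem.List.pyGet? xs 0 = xs.head? := by
  have h : (0 : Int) = ((0 : Nat) : Int) := rfl
  rw [h, PySem.List.pyGet?_natCast]; cases xs <;> simp

lemma pvGetNegOne {α : Type} (xs : List α) : PySem.List.pyGet? xs (-1) = xs.getLast? := by
  cases xs with
  | nil => simp [PySem.List.pyGet?, PySem.List.pyIdx?]
  | cons a t => simp [PySem.List.pyGet?, PySem.List.pyIdx?, List.getLast?_eq_getElem?]

lemma pvGetLenSubOne {α : Type} (xs : List α) :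
    PySem.List.pyGet? xs ((xs.length : Int) - 1) = xs.getLast? := by
  cases xs with
  | nil => simp [PySem.List.pyGet?, PySem.List.pyIdx?]
  | cons a t =>
    have h : ((a :: t).length : Int) - 1 = ((t.length : Nat) : Int) := by simp
    rw [h, PySem.List.pyGet?_natCast]
    simp [List.getLast?_eq_getElem?]

lemma pvEndswithIff (r : List Char) :
    PySem.Chars.endswith r ['0'] = true ↔ r.getLast? = some '0' := by
  rw [PySem.Chars.endswith_iff]
  constructor
  · rintro ⟨t, rfl⟩; simp
  · intro h
    have hne : r ≠ [] := by rintro rfl; simp at h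
    rw [List.getLast?_eq_some_getLast hne, Option.some_inj] at h
    exact ⟨r.dropLast, by rw [← h]; exact List.dropLast_append_getLast hne⟩

lemma pvStartswithFalseIff (c : Char) (rest : List Char) :
    PySem.Chars.startswith (c :: rest) ['0'] = false ↔ c ≠ '0' := by
  rw [← Bool.not_eq_true, PySem.Chars.startswith_iff, List.cons_prefix_cons]
  simp [eq_comm]

lemma pvFoldIte {α β : Type} (P : α → Prop) [DecidablePred P] (f : α → β) (l : List α)
    (acc : List β) :
    l.foldl (fun acc x => if P x then acc ++ [f x] else acc) acc
      = acc ++ (l.filter (fun x => decide (P x))).map f := by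
  induction l generalizing acc with
  | nil => simp
  | cons a t ih =>
    simp only [List.foldl_cons, List.filter_cons]
    by_cases h : P a <;> simp [h, ih]

lemma pvGetLastDrop (l : List Char) (k : Nat) (h : k < l.length) :
    (l.drop k).getLast? = l.getLast? := by
  have h1 : l.drop k ≠ [] := by
    simp only [ne_eq, List.drop_eq_nil_iff]; omega
  have h0 : l ≠ [] := by rintro rfl; simp at h
  rw [List.getLast?_eq_some_getLast h1, List.getLast?_eq_some_getLast h0, List.getLast_drop]

-- The main case analysis: A = B on every nonempty string outside D_.
lemma pvMain (substring : String) (hpre : substring ≠ "") (hnd : ¬ D_helper_py substring) :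
    helper_py substring = helper_py_alt substring := by
  obtain ⟨c, rest, hl⟩ : ∃ c rest, substring.toList = c :: rest := by
    cases h : substring.toList with
    | nil => exact absurd (String.toList_eq_nil_iff.mp h) hpre
    | cons c rest => exact ⟨c, rest, rfl⟩
  have hlast := List.getLast?_eq_some_getLast (l := c :: rest) (by simp)
  set d := (c :: rest).getLast (by simp) with hd_def
  simp only [helper_py, helper_py_alt, hl, zero_sub, pvGetZero, pvGetLenSubOne, pvGetNegOne,
    List.head?_cons, hlast]
  by_cases hc : c = '0' <;> by_cases hd : d = '0'
  · -- c = '0', last = '0' : outside D_ forces rest = [], substring = "0"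
    have hrest : rest = [] := by
      rcases rest with _ | ⟨x, t⟩
      · rfl
      · exfalso; apply hnd
        refine ⟨by rw [hl]; simp, by rw [hl, List.head?_cons, hc], ?_⟩
        rw [hl, hlast, hd]
    subst hrest
    have hsub : substring = "0" := by
      have h2 := congrArg String.ofList hl
      rw [String.ofList_toList] at h2
      rw [h2, hc]
    have hd' : d = c := by rw [hd_def]; rfl
    simp [hc, hd, hsub, PySem.List.pyRange_one_eq_nil]
  · -- c = '0', last ≠ '0' : rest ≠ [], A = ['0.' ++ rest], B filters down to split 1
    have hrest : rest ≠ [] := by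
      rintro rfl
      exact hd (by rw [hd_def, List.getLast_singleton, hc])
    have hne1 : c :: rest ≠ ['0'] := by
      intro h; injection h with _ h2; exact hrest h2
    have hsw : PySem.Chars.startswith (c :: rest) ['0'] = true := by
      rw [PySem.Chars.startswith_iff, List.cons_prefix_cons]; exact ⟨hc.symm, by simp⟩
    have hn2 : (1 : Int) < ((c :: rest).length : Int) := by
      rcases rest with _ | _
      · exact absurd rfl hrest
      · simp
    rw [if_neg (fun h => hd h.2), if_pos hc, if_neg (by simp [hne1, hsw])]
    rw [pvFoldIte, PySem.List.pyRange_one_cons hn2, List.filter_cons]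
    have hone : (1 : Int) = ((1 : Nat) : Int) := by norm_num
    have hleft1 : PySem.List.slice (c :: rest) none (some 1) = ['0'] := by
      rw [hone, PySem.List.slice_to_natCast]
      simp [hc]
    have hright1 : PySem.List.slice (c :: rest) (some 1) none = rest := by
      rw [hone, PySem.List.slice_from_natCast]
      simp
    have hP1 : ((PySem.List.slice (c :: rest) none (some 1) = ['0'] ∨
          PySem.Chars.startswith (PySem.List.slice (c :: rest) none (some 1)) ['0'] = false) ∧
        PySem.Chars.endswith (PySem.List.slice (c :: rest) (some 1) none) ['0'] = false) := by
      refine ⟨Or.inl hleft1, ?_⟩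
      rw [hright1, ← Bool.not_eq_true, pvEndswithIff]
      have : rest.getLast? = some d := by
        have := pvGetLastDrop (c :: rest) 1 (by simp [List.length_pos_iff.mpr hrest])
        simp only [List.drop_one, List.tail_cons] at this
        rw [this, hlast]
      rw [this]
      simp only [Option.some_inj]
      exact hd
    rw [if_pos (by exact_mod_cast decide_eq_true hP1)]
    have h12 : (1 : Int) + 1 = 2 := by norm_num
    rw [h12]
    have hrest2 : (List.filter (fun x => decide
        ((PySem.List.slice (c :: rest) none (some x) = ['0'] ∨
          PySem.Chars.startswith (PySem.List.slice (c :: rest) none (some x)) ['0'] = false) ∧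
         PySem.Chars.endswith (PySem.List.slice (c :: rest) (some x) none) ['0'] = false))
        (PySem.List.pyRange 2 ((c :: rest).length : Int) 1)) = [] := by
      rw [List.filter_eq_nil_iff]
      intro i hi
      obtain ⟨h2i, hin⟩ := PySem.List.mem_pyRange_one.mp hi
      set k := i.toNat with hk
      have hik : i = (k : Int) := by omega
      have h2k : 2 ≤ k := by omega
      have hkn : k < (c :: rest).length := by
        simp only [List.length_cons] at hin ⊢; omega
      simp only [decide_eq_true_eq, not_and]
      intro hPL
      exfalso
      have hleft : PySem.List.slice (c :: rest) none (some i) = c :: rest.take (k - 1) := by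
        rw [hik, PySem.List.slice_to_natCast]
        have hkk : k = (k - 1) + 1 := by omega
        rw [hkk, List.take_succ_cons]
        simp
      have htne : rest.take (k - 1) ≠ [] := by
        simp only [ne_eq, List.take_eq_nil_iff, not_or]
        exact ⟨by omega, hrest⟩
      rcases hPL with hPL | hPL
      · rw [hleft] at hPL
        injection hPL with _ h2; exact htne h2
      · rw [hleft, pvStartswithFalseIff] at hPL
        exact hPL hc
    rw [hrest2]
    simp only [List.map_cons, List.map_nil, List.nil_append, hleft1]
    rw [hc]
  · -- c ≠ '0', last = '0' : A = [substring], B keeps only the whole string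
    rw [if_neg (by simp [hc]), if_neg hc, if_pos hd,
      if_pos (Or.inr ((pvStartswithFalseIff c rest).mpr hc)), pvFoldIte]
    have hfil : (List.filter (fun x => decide
        ((PySem.List.slice (c :: rest) none (some x) = ['0'] ∨
          PySem.Chars.startswith (PySem.List.slice (c :: rest) none (some x)) ['0'] = false) ∧
         PySem.Chars.endswith (PySem.List.slice (c :: rest) (some x) none) ['0'] = false))
        (PySem.List.pyRange 1 ((c :: rest).length : Int) 1)) = [] := by
      rw [List.filter_eq_nil_iff]
      intro i hi
      obtain ⟨h1i, hin⟩ := PySem.List.mem_pyRange_one.mp hi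
      have hkn : i.toNat < (c :: rest).length := by
        simp only [List.length_cons] at hin ⊢; omega
      have hik : i = ((i.toNat : Nat) : Int) := by omega
      have hright : PySem.List.slice (c :: rest) (some i) none = (c :: rest).drop i.toNat := by
        conv_lhs => rw [hik]
        rw [PySem.List.slice_from_natCast]
      simp only [decide_eq_true_eq, not_and]
      intro _
      rw [hright, ← Bool.not_eq_true, pvEndswithIff, pvGetLastDrop _ _ hkn, hlast, hd]
      simp
    rw [hfil]
    simp
  · -- c ≠ '0', last ≠ '0' : both keep everything, in the same order
    rw [if_neg (by simp [hc]), if_neg hc, if_neg hd,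
      if_pos (Or.inr ((pvStartswithFalseIff c rest).mpr hc)),
      PySem.List.foldl_append_singleton_eq_map, pvFoldIte]
    have hfil : (List.filter (fun x => decide
        ((PySem.List.slice (c :: rest) none (some x) = ['0'] ∨
          PySem.Chars.startswith (PySem.List.slice (c :: rest) none (some x)) ['0'] = false) ∧
         PySem.Chars.endswith (PySem.List.slice (c :: rest) (some x) none) ['0'] = false))
        (PySem.List.pyRange 1 ((c :: rest).length : Int) 1))
        = PySem.List.pyRange 1 ((c :: rest).length : Int) 1 := by
      rw [List.filter_eq_self]
      intro i hi
      obtain ⟨h1i, hin⟩ := PySem.List.mem_pyRange_one.mp hi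
      have hkn : i.toNat < (c :: rest).length := by
        simp only [List.length_cons] at hin ⊢; omega
      have hik : i = ((i.toNat : Nat) : Int) := by omega
      have hleft : PySem.List.slice (c :: rest) none (some i) = c :: rest.take (i.toNat - 1) := by
        conv_lhs => rw [hik]
        rw [PySem.List.slice_to_natCast]
        conv_lhs => rw [show i.toNat = (i.toNat - 1) + 1 from by omega]
        rw [List.take_succ_cons]
      have hright : PySem.List.slice (c :: rest) (some i) none = (c :: rest).drop i.toNat := by
        conv_lhs => rw [hik]
        rw [PySem.List.slice_from_natCast]
      simp only [decide_eq_true_eq]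
      constructor
      · exact Or.inr (by rw [hleft, pvStartswithFalseIff]; exact hc)
      · rw [hright, ← Bool.not_eq_true, pvEndswithIff, pvGetLastDrop _ _ hkn, hlast]
        simp [hd]
    rw [hfil]
    congr 1

-- Inside D_ the two results differ everywhere: A returns ["0"], B returns [].
lemma pvTight (substring : String) (hD : D_helper_py substring) :
    helper_py substring = ["0"] ∧ helper_py_alt substring = [] := by
  obtain ⟨hlen, hhead, hlast0⟩ := hD
  obtain ⟨c, rest, hl⟩ : ∃ c rest, substring.toList = c :: rest := by
    cases h : substring.toList with
    | nil => rw [h] at hlen; simp at hlen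
    | cons c rest => exact ⟨c, rest, rfl⟩
  rw [hl, List.head?_cons, Option.some_inj] at hhead
  rw [hl] at hlast0
  have hrest : rest ≠ [] := by
    rintro rfl; rw [hl] at hlen; simp at hlen
  have hne1 : c :: rest ≠ ['0'] := by
    intro h; injection h with _ h2; exact hrest h2
  have hsw : PySem.Chars.startswith (c :: rest) ['0'] = true := by
    rw [PySem.Chars.startswith_iff, List.cons_prefix_cons]; exact ⟨hhead.symm, by simp⟩
  constructor
  · simp only [helper_py, hl, pvGetZero, pvGetLenSubOne, List.head?_cons, hlast0]
    rw [if_pos ⟨hhead, trivial⟩]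
  · simp only [helper_py_alt, hl]
    rw [if_neg (by simp [hne1, hsw]), pvFoldIte]
    have hfil : (List.filter (fun x => decide
        ((PySem.List.slice (c :: rest) none (some x) = ['0'] ∨
          PySem.Chars.startswith (PySem.List.slice (c :: rest) none (some x)) ['0'] = false) ∧
         PySem.Chars.endswith (PySem.List.slice (c :: rest) (some x) none) ['0'] = false))
        (PySem.List.pyRange 1 ((c :: rest).length : Int) 1)) = [] := by
      rw [List.filter_eq_nil_iff]
      intro i hi
      obtain ⟨h1i, hin⟩ := PySem.List.mem_pyRange_one.mp hi
      have hkn : i.toNat < (c :: rest).length := by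
        simp only [List.length_cons] at hin ⊢; omega
      have hik : i = ((i.toNat : Nat) : Int) := by omega
      have hright : PySem.List.slice (c :: rest) (some i) none = (c :: rest).drop i.toNat := by
        conv_lhs => rw [hik]
        rw [PySem.List.slice_from_natCast]
      simp only [decide_eq_true_eq, not_and]
      intro _
      rw [hright, ← Bool.not_eq_true, pvEndswithIff, pvGetLastDrop _ _ hkn, hlast0]
      simp
    rw [hfil]
    simp

-- ===== VERDICT (by name: the statement is the Claim_ definition above) =====
theorem helper_py_spec : Claim_unchanged_helper_py := by
  intro substring _ hpre
  unfold Spec_helper_py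
  intro hnd
  exact pvMain substring hpre hnd
theorem helper_py_changed : Claim_changed_helper_py := by unfold Claim_changed_helper_py; decide
theorem helper_py_tight : Claim_exact_helper_py := by
  intro substring _ _ hD
  obtain ⟨hA, hB⟩ := pvTight substring hD
  rw [hA, hB]
  simp
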